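-- pv_equiv track=rewrite | github.com/YabingHu/Applied-Machine-Learning-Penn-CIS519 | hw2.py | extract_features_dev_or_test
-- ===== SOURCE A (Python) =====
-- def extract_features_dev_or_test(data, features):
--     """
--     Extracts feature dictionaries and labels from "data". The only
--     features which should be computed are those in "features". You
--     should add your additional featurization code here.
--
--     TODO: You should add your additional featurization code here.
--     """
--     y = []
--     X = []
--     for sentence in data:
--         padded = sentence[:]
--         padded.insert(0, ('SSS', None))
--         padded.insert(0, ('SSS', None))
--         padded.insert(0, ('SSS', None))
--         padded.append(('EEE', None))
--         padded.append(('EEE', None))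
--         padded.append(('EEE', None))
--         for i in range(3, len(padded) - 3):
--             y.append(1 if padded[i][1] == 'I' else -1)
--             feat1 = 'w-1=' + str(padded[i - 1][0])
--             feat2 = 'w+1=' + str(padded[i + 1][0])
--             feat3 = 'w-2=' + str(padded[i - 2][0])
--             feat4 = 'w+2=' + str(padded[i + 2][0])
--             feat5 = 'w-3=' + str(padded[i - 3][0])
--             feat6 = 'w+3=' + str(padded[i + 3][0])
--             feat7 = 'w-1=' + str(padded[i - 1][0])+'&'+'w-2=' + str(padded[i - 2][0])
--             feat8 = 'w+1=' + str(padded[i + 1][0])+'&'+'w+2=' + str(padded[i + 2][0])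
--             feat9 = 'w-1=' + str(padded[i - 1][0])+'&'+'w+1=' + str(padded[i + 1][0])
--             feats = [feat1, feat2,feat3,feat4,feat5, feat6,feat7, feat8,feat9]
--             feats = {feature: 1 for feature in feats if feature in features}
--             X.append(feats)
--     return X, y
-- ===== SOURCE B (Python) =====
-- def extract_features_dev_or_test(data, features):
--     """Columnar build: per sentence, make nine whole-column lists of feature
--     strings via slice-shifted word lists, then zip the columns into rows;
--     labels are a separate comprehension. Feature membership via a set."""
--     featset = set(features)
--     X, y = [], []
--     for sentence in data:
--         words = [w for w, _ in sentence]
--         m1 = ['w-1=' + w for w in _shift(words, -1)]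
--         p1 = ['w+1=' + w for w in _shift(words, 1)]
--         m2 = ['w-2=' + w for w in _shift(words, -2)]
--         p2 = ['w+2=' + w for w in _shift(words, 2)]
--         m3 = ['w-3=' + w for w in _shift(words, -3)]
--         p3 = ['w+3=' + w for w in _shift(words, 3)]
--         for a, b, c, d, e, f in zip(m1, p1, m2, p2, m3, p3):
--             cand = (a, b, c, d, e, f, a + '&' + c, b + '&' + d, a + '&' + b)
--             X.append({t: 1 for t in cand if t in featset})
--         y.extend(1 if tag == 'I' else -1 for _, tag in sentence)
--     return X, y
--
--
-- def _shift(words, d):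
--     """The column of neighbor words at offset d: SSS before the start,
--     EEE past the end, same length as words."""
--     n = len(words)
--     if d >= 0:
--         return words[d:] + ['EEE'] * min(d, n)
--     return ['SSS'] * min(-d, n) + words[:max(n + d, 0)]
-- ===== Notes on version B (the rewrite author's own statement) =====
-- stated objective: alternative
-- what changed: B replaces A's padded-copy plus per-index window loop by a columnar build: per sentence it materializes nine whole columns of feature strings from slice-shifted word lists and zips the columns into rows, with labels from a separate comprehension and feature membership through a set.
import Mathlib
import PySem

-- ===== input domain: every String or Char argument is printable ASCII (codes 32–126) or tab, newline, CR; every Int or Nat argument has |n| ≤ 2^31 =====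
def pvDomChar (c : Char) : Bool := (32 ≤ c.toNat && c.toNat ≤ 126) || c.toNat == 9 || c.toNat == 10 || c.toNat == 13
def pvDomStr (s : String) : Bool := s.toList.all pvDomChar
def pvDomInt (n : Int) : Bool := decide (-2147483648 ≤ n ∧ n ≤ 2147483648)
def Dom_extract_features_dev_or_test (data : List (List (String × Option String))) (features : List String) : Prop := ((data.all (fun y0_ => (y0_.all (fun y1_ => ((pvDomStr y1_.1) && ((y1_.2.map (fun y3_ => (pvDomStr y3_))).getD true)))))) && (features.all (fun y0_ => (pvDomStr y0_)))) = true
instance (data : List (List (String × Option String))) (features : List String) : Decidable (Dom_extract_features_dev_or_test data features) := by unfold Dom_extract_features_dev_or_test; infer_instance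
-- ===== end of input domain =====

-- B replaces A's padded copy and per-index window loop by a columnar build: nine whole
-- columns of feature strings from slice-shifted word lists, zipped into rows (objective:
-- alternative decomposition, same cost).

-- ===== PORT A =====
-- padded = sentence[:] with three ('SSS', None) inserted at the front and three ('EEE', None) appended
def pvPadded (sentence : List (String × Option String)) : List (String × Option String) :=
  ("SSS", (none : Option String)) :: ("SSS", none) :: ("SSS", none) ::
    (sentence ++ [("EEE", none), ("EEE", none), ("EEE", none)])

-- padded[i]; A only indexes in range (3 ≤ i < len(padded) - 3 shifted by -3..3), so the default is never reached
def pvPadGetA (padded : List (String × Option String)) (i : Int) : String × Option String :=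
  (PySem.List.pyGet? padded i).getD ("", none)

-- the body of A's inner loop building feat1..feat9 and the filtered dict (str(w) = w on strings)
def pvFeatsA (padded : List (String × Option String)) (i : Int) (features : List String) :
    List (String × Int) :=
  let feat1 := "w-1=" ++ (pvPadGetA padded (i - 1)).1
  let feat2 := "w+1=" ++ (pvPadGetA padded (i + 1)).1
  let feat3 := "w-2=" ++ (pvPadGetA padded (i - 2)).1
  let feat4 := "w+2=" ++ (pvPadGetA padded (i + 2)).1
  let feat5 := "w-3=" ++ (pvPadGetA padded (i - 3)).1
  let feat6 := "w+3=" ++ (pvPadGetA padded (i + 3)).1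
  let feat7 := "w-1=" ++ (pvPadGetA padded (i - 1)).1 ++ "&" ++ "w-2=" ++ (pvPadGetA padded (i - 2)).1
  let feat8 := "w+1=" ++ (pvPadGetA padded (i + 1)).1 ++ "&" ++ "w+2=" ++ (pvPadGetA padded (i + 2)).1
  let feat9 := "w-1=" ++ (pvPadGetA padded (i - 1)).1 ++ "&" ++ "w+1=" ++ (pvPadGetA padded (i + 1)).1
  let feats := [feat1, feat2, feat3, feat4, feat5, feat6, feat7, feat8, feat9]
  (feats.foldl (fun d f => if features.contains f then d.insert f 1 else d)
      (PySem.Dict.empty : PySem.Dict String Int)).items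

def extract_features_dev_or_test (data : List (List (String × Option String))) (features : List String) : (List (List (String × Int))) × List Int :=
  data.foldl (fun acc sentence =>
    let padded := pvPadded sentence
    (PySem.List.pyRange 3 (PySem.List.len padded - 3) 1).foldl (fun acc i =>
      (acc.1 ++ [pvFeatsA padded i features],
       acc.2 ++ [if (pvPadGetA padded i).2 = some "I" then (1 : Int) else -1])) acc)
    (([], []) : List (List (String × Int)) × List Int)

-- ===== PORT B =====
-- _shift(words, d) from Source B: words[d:] + ['EEE']*min(d,n) for d >= 0, else ['SSS']*min(-d,n) + words[:max(n+d,0)]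
def pvShift (words : List String) (d : Int) : List String :=
  if 0 ≤ d then
    PySem.List.slice words (some d) none ++
      List.replicate (min d (PySem.List.len words)).toNat "EEE"
  else
    List.replicate (min (-d) (PySem.List.len words)).toNat "SSS" ++
      PySem.List.slice words none (some (max (PySem.List.len words + d) 0))

-- the row built from one zipped 6-tuple of column entries
def pvRowB (featset : List String) (x : String × String × String × String × String × String) :
    List (String × Int) :=
  let a := x.1
  let b := x.2.1
  let c := x.2.2.1
  let d := x.2.2.2.1
  let e := x.2.2.2.2.1
  let f := x.2.2.2.2.2
  let cand := [a, b, c, d, e, f, a ++ "&" ++ c, b ++ "&" ++ d, a ++ "&" ++ b]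
  (cand.foldl (fun dd t => if PySem.Set.contains featset t then dd.insert t 1 else dd)
      (PySem.Dict.empty : PySem.Dict String Int)).items

def extract_features_dev_or_test_alt (data : List (List (String × Option String))) (features : List String) : (List (List (String × Int))) × List Int :=
  let featset := PySem.Set.ofList features
  data.foldl (fun acc sentence =>
    let words := sentence.map (fun wt => wt.1)
    let m1 := (pvShift words (-1)).map (fun w => "w-1=" ++ w)
    let p1 := (pvShift words 1).map (fun w => "w+1=" ++ w)
    let m2 := (pvShift words (-2)).map (fun w => "w-2=" ++ w)
    let p2 := (pvShift words 2).map (fun w => "w+2=" ++ w)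
    let m3 := (pvShift words (-3)).map (fun w => "w-3=" ++ w)
    let p3 := (pvShift words 3).map (fun w => "w+3=" ++ w)
    let rows := (List.zip m1 (List.zip p1 (List.zip m2 (List.zip p2 (List.zip m3 p3))))).map
      (pvRowB featset)
    (acc.1 ++ rows,
     acc.2 ++ sentence.map (fun wt => if wt.2 = some "I" then (1 : Int) else -1)))
    (([], []) : List (List (String × Int)) × List Int)

-- ===== PRECONDITION & SPEC =====
def Spec_extract_features_dev_or_test (data : List (List (String × Option String))) (features : List String) (out : (List (List (String × Int))) × List Int) : Prop := out = extract_features_dev_or_test_alt data features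
instance (data : List (List (String × Option String))) (features : List String) (out : (List (List (String × Int))) × List Int) : Decidable (Spec_extract_features_dev_or_test data features out) := by unfold Spec_extract_features_dev_or_test; infer_instance

-- ===== CLAIM (what is proved, stated in full; the proofs are below) =====
def Claim_equal_extract_features_dev_or_test : Prop := ∀ (data : List (List (String × Option String))) (features : List String), Dom_extract_features_dev_or_test data features → Spec_extract_features_dev_or_test data features (extract_features_dev_or_test data features)

-- ===== LEMMAS AND PROOFS =====

-- canonical neighbor word at integer offset k into the word list
def pvNbW (words : List String) (k : Int) : String :=
  if k < 0 then "SSS"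
  else if PySem.List.len words ≤ k then "EEE"
  else PySem.List.pyGetD words k ""

-- canonical row at position j, phrased over the word list and plain list membership
def pvRowC (words : List String) (features : List String) (j : Int) : List (String × Int) :=
  pvRowB features
    ("w-1=" ++ pvNbW words (j - 1),
     "w+1=" ++ pvNbW words (j + 1),
     "w-2=" ++ pvNbW words (j - 2),
     "w+2=" ++ pvNbW words (j + 2),
     "w-3=" ++ pvNbW words (j - 3),
     "w+3=" ++ pvNbW words (j + 3))

lemma contains_ofList (features : List String) (t : String) :
    List.contains (PySem.Set.ofList features) t = features.contains t := by
  by_cases h : t ∈ features <;>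
    simp [PySem.Set.mem_ofList, h]

lemma pvRowB_ofList (features : List String) (x : String × String × String × String × String × String) :
    pvRowB (PySem.Set.ofList features) x = pvRowB features x := by
  unfold pvRowB
  simp only [PySem.Set.contains_eq_listContains, contains_ofList]
  rfl

lemma pvPadGetA_pvPadded (s : List (String × Option String)) (i : Int)
    (h0 : 0 ≤ i) (h1 : i < (s.length : Int) + 6) :
    pvPadGetA (pvPadded s) i =
      if i < 3 then ("SSS", none)
      else if (s.length : Int) + 3 ≤ i then ("EEE", none)
      else (PySem.List.pyGet? s (i - 3)).getD ("", none) := by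
  lift i to ℕ using h0 with t
  unfold pvPadGetA pvPadded
  rw [PySem.List.pyGet?_natCast]
  by_cases hc : (t : Int) < 3
  · rw [if_pos hc]
    have h3 : t < 3 := by exact_mod_cast hc
    interval_cases t <;> rfl
  · rw [if_neg hc]
    obtain ⟨u, rfl⟩ : ∃ u, t = u + 3 := ⟨t - 3, by omega⟩
    have hs : (("SSS", (none : Option String)) :: ("SSS", none) :: ("SSS", none) ::
        (s ++ [("EEE", (none : Option String)), ("EEE", none), ("EEE", none)]))[u + 3]? =
        (s ++ [("EEE", (none : Option String)), ("EEE", none), ("EEE", none)])[u]? := by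
      simp
    rw [hs]
    by_cases he : (s.length : Int) + 3 ≤ (↑(u + 3) : Int)
    · rw [if_pos he]
      have hlu : s.length ≤ u := by omega
      rw [List.getElem?_append_right hlu]
      have : u - s.length < 3 := by omega
      obtain ⟨v, rfl⟩ : ∃ v, u = s.length + v := ⟨u - s.length, by omega⟩
      have hv : s.length + v - s.length = v := by omega
      rw [hv]
      have : v < 3 := by omega
      interval_cases v <;> rfl
    · rw [if_neg he]
      have hul : u < s.length := by omega
      rw [List.getElem?_append_left hul]
      have : ((u + 3 : ℕ) : Int) - 3 = ((u : ℕ) : Int) := by push_cast; ring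
      rw [this, PySem.List.pyGet?_natCast]

lemma pvPadGetA_fst (s : List (String × Option String)) (j d : Int)
    (hj0 : 0 ≤ j) (hj1 : j < (s.length : Int)) (hd0 : -3 ≤ d) (hd1 : d ≤ 3) :
    (pvPadGetA (pvPadded s) (j + 3 + d)).1 = pvNbW (s.map Prod.fst) (j + d) := by
  rw [pvPadGetA_pvPadded s _ (by omega) (by omega)]
  unfold pvNbW
  rw [PySem.List.len_eq]
  have h3 : j + 3 + d - 3 = j + d := by ring
  rw [h3]
  have hlm : ((s.map Prod.fst).length : Int) = (s.length : Int) := by simp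
  rw [hlm]
  by_cases c1 : j + d < 0
  · rw [if_pos (by omega : j + 3 + d < 3), if_pos c1]
  · by_cases c2 : (s.length : Int) ≤ j + d
    · rw [if_neg (by omega), if_pos (by omega), if_neg c1, if_pos c2]
    · rw [if_neg (by omega), if_neg (by omega), if_neg c1, if_neg c2]
      have h0 : 0 ≤ j + d := by omega
      lift (j + d) to ℕ using h0 with t
      have ht : t < s.length := by exact_mod_cast (by omega : (t : Int) < (s.length : Int))
      rw [PySem.List.pyGet?_natCast, PySem.List.pyGetD_natCast]
      simp [List.getD, List.getElem?_eq_getElem ht, List.getElem?_map]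

lemma pvFeatsA_eq_pvRowC (s : List (String × Option String)) (features : List String)
    (j : Int) (hj0 : 0 ≤ j) (hj1 : j < (s.length : Int)) :
    pvFeatsA (pvPadded s) (j + 3) features = pvRowC (s.map Prod.fst) features j := by
  have key : ∀ d : Int, -3 ≤ d → d ≤ 3 →
      (pvPadGetA (pvPadded s) (j + 3 + d)).1 = pvNbW (s.map Prod.fst) (j + d) :=
    fun d h1 h2 => pvPadGetA_fst s j d hj0 hj1 h1 h2
  have h1 : (pvPadGetA (pvPadded s) (j + 3 - 1)).1 = pvNbW (s.map Prod.fst) (j - 1) := by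
    simpa [show j + 3 + (-1) = j + 3 - 1 by ring, show j + (-1) = j - 1 by ring]
      using key (-1) (by omega) (by omega)
  have h2 : (pvPadGetA (pvPadded s) (j + 3 + 1)).1 = pvNbW (s.map Prod.fst) (j + 1) := key 1 (by omega) (by omega)
  have h3 : (pvPadGetA (pvPadded s) (j + 3 - 2)).1 = pvNbW (s.map Prod.fst) (j - 2) := by
    simpa [show j + 3 + (-2) = j + 3 - 2 by ring, show j + (-2) = j - 2 by ring]
      using key (-2) (by omega) (by omega)
  have h4 : (pvPadGetA (pvPadded s) (j + 3 + 2)).1 = pvNbW (s.map Prod.fst) (j + 2) := key 2 (by omega) (by omega)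
  have h5 : (pvPadGetA (pvPadded s) (j + 3 - 3)).1 = pvNbW (s.map Prod.fst) (j - 3) := by
    simpa [show j + 3 + (-3) = j + 3 - 3 by ring, show j + (-3) = j - 3 by ring]
      using key (-3) (by omega) (by omega)
  have h6 : (pvPadGetA (pvPadded s) (j + 3 + 3)).1 = pvNbW (s.map Prod.fst) (j + 3) := key 3 (by omega) (by omega)
  unfold pvFeatsA pvRowC pvRowB
  simp only [PySem.Set.contains_eq_listContains, h1, h2, h3, h4, h5, h6, String.append_assoc]
  rfl

lemma map_range_getD {α β : Type} (l : List α) (d : α) (f : α → β) :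
    (List.range l.length).map (fun k => f (l.getD k d)) = l.map f := by
  apply List.ext_getElem (by simp)
  intro n h1 h2
  have hn : n < l.length := by simpa using h2
  simp [List.getD, List.getElem?_eq_getElem hn]

-- A's per-sentence loop produces the canonical chunk
lemma pvInner_eq (s : List (String × Option String)) (features : List String)
    (X : List (List (String × Int))) (Y : List Int) :
    (PySem.List.pyRange 3 (PySem.List.len (pvPadded s) - 3) 1).foldl (fun acc i =>
        (acc.1 ++ [pvFeatsA (pvPadded s) i features],
         acc.2 ++ [if (pvPadGetA (pvPadded s) i).2 = some "I" then (1 : Int) else -1])) (X, Y) =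
      (X ++ (List.range s.length).map (fun k : ℕ => pvRowC (s.map Prod.fst) features k),
       Y ++ s.map (fun wt => if wt.2 = some "I" then (1 : Int) else -1)) := by
  have hlen : PySem.List.len (pvPadded s) - 3 = (s.length : Int) + 3 := by
    simp [pvPadded, PySem.List.len_eq]; ring
  rw [hlen]
  rw [PySem.List.foldl_prod_mk (f := fun X i => X ++ [pvFeatsA (pvPadded s) i features])
      (g := fun Y i => Y ++ [if (pvPadGetA (pvPadded s) i).2 = some "I" then (1 : Int) else -1])]
  rw [PySem.List.foldl_append_singleton_eq_map, PySem.List.foldl_append_singleton_eq_map]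
  have hr : PySem.List.pyRange 3 ((s.length : Int) + 3) 1 =
      (List.range s.length).map (fun k : ℕ => (3 : Int) + k) := by
    rw [PySem.List.pyRange_one]
    congr 1
    congr 1
    omega
  rw [hr, List.map_map, List.map_map]
  simp only [Prod.mk.injEq]
  have lab : ∀ k : ℕ, k < s.length →
      pvPadGetA (pvPadded s) ((3 : Int) + k) = s.getD k ("", none) := by
    intro k hkn
    rw [pvPadGetA_pvPadded s ((3 : Int) + k) (by positivity) (by omega)]
    split_ifs with c1 c2
    · omega
    · omega
    · rw [show (3 : Int) + k - 3 = (k : Int) by ring, PySem.List.pyGet?_natCast]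
      simp [List.getD]
  refine ⟨?_, ?_⟩
  · congr 1
    apply List.map_congr_left
    intro k hk
    have hkn : k < s.length := List.mem_range.mp hk
    simp only [Function.comp_apply]
    rw [show (3 : Int) + k = (k : Int) + 3 by ring]
    exact pvFeatsA_eq_pvRowC s features k (by positivity) (by exact_mod_cast hkn)
  · congr 1
    calc (List.range s.length).map
          ((fun i => if (pvPadGetA (pvPadded s) i).2 = some "I" then (1 : Int) else -1) ∘
            (fun k : ℕ => (3 : Int) + k))
        = (List.range s.length).map
            (fun k => if (s.getD k ("", none)).2 = some "I" then (1 : Int) else -1) := by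
          apply List.map_congr_left
          intro k hk
          simp only [Function.comp_apply, lab k (List.mem_range.mp hk)]
      _ = s.map (fun wt => if wt.2 = some "I" then (1 : Int) else -1) :=
          map_range_getD s ("", none) (fun wt => if wt.2 = some "I" then (1 : Int) else -1)

-- B's shifted column is the canonical neighbor column
lemma pvShift_eq (words : List String) (d : Int) :
    pvShift words d = (List.range words.length).map (fun j : ℕ => pvNbW words ((j : Int) + d)) := by
  unfold pvShift
  by_cases hd : 0 ≤ d
  · rw [if_pos hd]
    lift d to ℕ using hd with m
    have hmin : (min ((m : Int)) (PySem.List.len words)).toNat = min m words.length := by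
      rw [PySem.List.len_eq]; omega
    rw [hmin, PySem.List.slice_from_natCast]
    apply List.ext_getElem
    · simp; omega
    · intro n h1 h2
      have hn : n < words.length := by simpa using h2
      have hR : ((List.range words.length).map (fun j : ℕ => pvNbW words ((j : Int) + m)))[n]'h2 =
          pvNbW words ((n : Int) + m) := by simp
      rw [hR]
      unfold pvNbW
      rw [PySem.List.len_eq]
      by_cases hin : n + m < words.length
      · rw [List.getElem_append_left (by simp; omega)]
        rw [if_neg (by omega), if_neg (by omega)]
        have hcast : ((n : Int) + (m : Int)) = ((n + m : ℕ) : Int) := by push_cast; ring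
        rw [hcast, PySem.List.pyGetD_natCast]
        have hmn : m + n < words.length := by omega
        simp [List.getD, List.getElem?_eq_getElem hmn, Nat.add_comm]
      · rw [List.getElem_append_right (by simp; omega)]
        rw [if_neg (by omega), if_pos (by omega)]
        simp
  · rw [if_neg hd]
    obtain ⟨k, hk, rfl⟩ : ∃ k : ℕ, 0 < k ∧ d = -(k : Int) :=
      ⟨(-d).toNat, by omega, by omega⟩
    have hmin : (min (-(-(k : Int))) (PySem.List.len words)).toNat = min k words.length := by
      rw [PySem.List.len_eq]; omega
    have hmax : max (PySem.List.len words + -(k : Int)) 0 = ((words.length - k : ℕ) : Int) := by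
      rw [PySem.List.len_eq]; omega
    rw [hmin, hmax, PySem.List.slice_to_natCast]
    apply List.ext_getElem
    · simp; omega
    · intro n h1 h2
      have hn : n < words.length := by simpa using h2
      have hR : ((List.range words.length).map (fun j : ℕ => pvNbW words ((j : Int) + -(k : Int))))[n]'h2 =
          pvNbW words ((n : Int) + -(k : Int)) := by simp
      rw [hR]
      unfold pvNbW
      rw [PySem.List.len_eq]
      by_cases hin : n < k
      · rw [List.getElem_append_left (by simp; omega)]
        rw [if_pos (by omega)]
        simp
      · rw [List.getElem_append_right (by simp; omega)]
        rw [if_neg (by omega), if_neg (by omega)]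
        have hcast : ((n : Int) + -(k : Int)) = ((n - k : ℕ) : Int) := by omega
        rw [hcast, PySem.List.pyGetD_natCast]
        have hnk : n - k < words.length := by omega
        have hmk : min k words.length = k := by omega
        simp [hmk, List.getD, List.getElem?_eq_getElem hnk]

-- B's zipped columns are the canonical chunk
lemma pvRows_eq (s : List (String × Option String)) (features : List String) :
    (List.zip ((pvShift (s.map Prod.fst) (-1)).map (fun w => "w-1=" ++ w))
      (List.zip ((pvShift (s.map Prod.fst) 1).map (fun w => "w+1=" ++ w))
        (List.zip ((pvShift (s.map Prod.fst) (-2)).map (fun w => "w-2=" ++ w))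
          (List.zip ((pvShift (s.map Prod.fst) 2).map (fun w => "w+2=" ++ w))
            (List.zip ((pvShift (s.map Prod.fst) (-3)).map (fun w => "w-3=" ++ w))
              ((pvShift (s.map Prod.fst) 3).map (fun w => "w+3=" ++ w))))))).map
        (pvRowB (PySem.Set.ofList features)) =
      (List.range s.length).map (fun k : ℕ => pvRowC (s.map Prod.fst) features k) := by
  set words := s.map Prod.fst with hw
  have hlen : words.length = s.length := by simp [hw]
  simp only [pvShift_eq, List.map_map]
  rw [List.zip_map', List.zip_map', List.zip_map', List.zip_map', List.zip_map',
      List.map_map, hlen]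
  apply List.map_congr_left
  intro k _
  simp only [Function.comp_apply]
  rw [pvRowB_ofList]
  unfold pvRowC
  simp only [show ∀ z : Int, z + -1 = z - 1 from fun z => by ring,
    show ∀ z : Int, z + -2 = z - 2 from fun z => by ring,
    show ∀ z : Int, z + -3 = z - 3 from fun z => by ring]

lemma pvOuterA_eq (features : List String) (data : List (List (String × Option String))) :
    ∀ (X : List (List (String × Int))) (Y : List Int),
    data.foldl (fun acc sentence =>
        (PySem.List.pyRange 3 (PySem.List.len (pvPadded sentence) - 3) 1).foldl (fun acc i =>
          (acc.1 ++ [pvFeatsA (pvPadded sentence) i features],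
           acc.2 ++ [if (pvPadGetA (pvPadded sentence) i).2 = some "I" then (1 : Int) else -1])) acc)
      (X, Y) =
    (X ++ data.flatMap (fun s =>
        (List.range s.length).map (fun k : ℕ => pvRowC (s.map Prod.fst) features k)),
     Y ++ data.flatMap (fun s =>
        s.map (fun wt => if wt.2 = some "I" then (1 : Int) else -1))) := by
  induction data with
  | nil => intro X Y; simp
  | cons s rest ih =>
    intro X Y
    simp only [List.foldl_cons, List.flatMap_cons]
    rw [pvInner_eq, ih]
    simp [List.append_assoc]

lemma pvOuterB_eq (features : List String) (data : List (List (String × Option String))) :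
    ∀ (X : List (List (String × Int))) (Y : List Int),
    data.foldl (fun acc sentence =>
        (acc.1 ++ (List.zip ((pvShift (sentence.map (fun wt => wt.1)) (-1)).map (fun w => "w-1=" ++ w))
          (List.zip ((pvShift (sentence.map (fun wt => wt.1)) 1).map (fun w => "w+1=" ++ w))
            (List.zip ((pvShift (sentence.map (fun wt => wt.1)) (-2)).map (fun w => "w-2=" ++ w))
              (List.zip ((pvShift (sentence.map (fun wt => wt.1)) 2).map (fun w => "w+2=" ++ w))
                (List.zip ((pvShift (sentence.map (fun wt => wt.1)) (-3)).map (fun w => "w-3=" ++ w))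
                  ((pvShift (sentence.map (fun wt => wt.1)) 3).map (fun w => "w+3=" ++ w))))))).map
            (pvRowB (PySem.Set.ofList features)),
         acc.2 ++ sentence.map (fun wt => if wt.2 = some "I" then (1 : Int) else -1)))
      (X, Y) =
    (X ++ data.flatMap (fun s =>
        (List.range s.length).map (fun k : ℕ => pvRowC (s.map Prod.fst) features k)),
     Y ++ data.flatMap (fun s =>
        s.map (fun wt => if wt.2 = some "I" then (1 : Int) else -1))) := by
  induction data with
  | nil => intro X Y; simp
  | cons s rest ih =>
    intro X Y
    simp only [List.foldl_cons, List.flatMap_cons]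
    have hfst : (fun wt : String × Option String => wt.1) = Prod.fst := rfl
    rw [hfst, pvRows_eq, ih]
    simp [List.append_assoc]

-- ===== VERDICT (by name: the statement is the Claim_ definition above) =====
theorem extract_features_dev_or_test_spec : Claim_equal_extract_features_dev_or_test := by
  intro data features _
  unfold Spec_extract_features_dev_or_test
  simp only [extract_features_dev_or_test, extract_features_dev_or_test_alt]
  rw [pvOuterA_eq, pvOuterB_eq]
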